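-- pv_equiv track=rewrite | github.com/Shin-GC/Coding-Test | 신규 아이디 추천.PY | solution
-- ===== SOURCE A (Python) =====
-- def solution(new_id):
--     answer = ''
--
--     lower=new_id.lower() #1단계 소문자 치환
--     #special=re.sub('..[=+,#/\?:^$@*\"※~&%ㆍ!』\\‘|\(\)\[\]\<\>`\'…》]', '',lower)
--     #lower=re.sub(r'[{}=+,#/\?:^$@*\"※~&%ㆍ!』\\‘|\(\)\[\]\<\>`\']', '',lower) # 2단계 알파벳,숫자,-,_,. 를 뺀 나머지 제외
--     for c in lower:
--         if c.isalpha() or c.isdigit() or c in ['-', '_', '.']: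
--             answer+=c
--
--     arr=list(answer)
--
--     new_arr=[]
--     for i in range(len(arr)):#..이 붙어 있을시 한개로 바꾸기 3단계
--         if i == len(arr)-1 or len(arr)==1:
--             new_arr.append(arr[i])
--             break
--         if arr[i]=='.':
--             if arr[i+1]=='.':
--               continue
--             else:
--                 new_arr.append(arr[i])
--         else:
--             new_arr.append(arr[i])
--
--     answer=''.join(new_arr)
--
--     answer=answer.rstrip('.')
--     answer=answer.lstrip('.')
--     #처음이나 끝에 .이 있을 시 제거
--     if answer=='': #공백일시 aaa 넣기 5단계
--         answer='aaa'
--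
--
--     if len(answer) > 15:  #16글자 이상일시 자르기
--         answer=answer[:15]
--     answer=answer.rstrip('.') #자르고 난 후 마침표 제거
--     while(True): #아이디가 2자 이하일시 3이 될때까지 반복해서 붙임 7단계
--         if len(answer)<=2:
--             answer+=answer[len(answer)-1]
--         else:
--             break
--     return answer
-- ===== SOURCE B (Python) =====
-- def solution(new_id):
--     # single streaming pass: filter, collapse dots, drop leading dots and truncate
--     # to 15 chars all at once, with early exit; then pop trailing dots, default,
--     # and pad by a closed formula
--     out = []
--     for c in new_id.lower():
--         if len(out) == 15:
--             break
--         if c == '.':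
--             if out and out[-1] != '.':
--                 out.append('.')
--         elif c.isalpha() or c.isdigit() or c in '-_':
--             out.append(c)
--     while out and out[-1] == '.':
--         out.pop()
--     if not out:
--         out = ['a', 'a', 'a']
--     return ''.join(out) + out[-1] * (3 - len(out))
-- ===== Notes on version B (the rewrite author's own statement) =====
-- stated objective: faster
-- what changed: A runs four staged passes over all the data (a filtering loop building a string by repeated concatenation, an index loop with lookahead arr[i+1]/continue/break collapsing dot runs over the whole filtered string, strip/default/truncate steps, then a while-loop padding one char at a time); B is a single streaming pass that stops reading the input as soon as 15 characters have been kept, filtering, collapsing dot runs and dropping leading dots on the fly via the last-kept-character state, followed by a trailing-dot pop loop and a closed-form pad.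
import Mathlib
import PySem

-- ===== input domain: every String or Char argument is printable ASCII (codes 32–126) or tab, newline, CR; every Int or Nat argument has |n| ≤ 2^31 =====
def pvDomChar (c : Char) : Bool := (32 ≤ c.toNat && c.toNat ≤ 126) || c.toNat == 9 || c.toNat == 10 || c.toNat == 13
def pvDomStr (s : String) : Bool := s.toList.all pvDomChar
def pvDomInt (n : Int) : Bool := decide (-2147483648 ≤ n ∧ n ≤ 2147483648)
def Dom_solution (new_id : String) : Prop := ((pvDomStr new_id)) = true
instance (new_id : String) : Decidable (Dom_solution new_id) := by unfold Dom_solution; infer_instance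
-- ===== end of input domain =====

-- B replaces A's four staged passes over all the data (filter loop, index scan with lookahead
-- over the whole filtered string, strip/default/truncate, while-loop padding) by ONE streaming
-- pass that stops reading as soon as 15 characters are kept, filtering, collapsing dot runs and
-- dropping leading dots on the fly, then a trailing-dot pop loop and a closed-form pad (the
-- timing run measured B faster).

-- "c.isalpha() or c.isdigit() or c in ['-', '_', '.']" (A's filter test)
def pvAllowed (c : Char) : Bool :=
  PySem.Chars.isalpha c || PySem.Chars.isdigit c || ['-', '_', '.'].contains c

-- s.rstrip('.') / s.lstrip('.') on the char list (exact: drop '.' from the right / left end)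
def pvRstripDot (cs : List Char) : List Char := (cs.reverse.dropWhile (· == '.')).reverse
def pvLstripDot (cs : List Char) : List Char := cs.dropWhile (· == '.')

-- ===== PORT A =====
-- the index loop over range(len(arr)) with its lookahead arr[i+1], `continue` and `break`
-- (arr.getD (i+1) is arr[i+1]: the branch guarantees i+1 < len, so the default is never read)
def pvLoopA (arr : List Char) (i : Nat) (acc : List Char) : List Char :=
  if h : i < arr.length then
    if i == arr.length - 1 || arr.length == 1 then acc ++ [arr[i]]
    else if arr[i] == '.' then
      if arr.getD (i + 1) ' ' == '.' then pvLoopA arr (i + 1) acc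
      else pvLoopA arr (i + 1) (acc ++ [arr[i]])
    else pvLoopA arr (i + 1) (acc ++ [arr[i]])
  else acc
termination_by arr.length - i

-- the final while-loop: append answer[len-1] until length 3 (Python raises on the empty
-- string there; that state is unreachable from solution, the port returns the string as is)
def pvPadA (cs : List Char) : List Char :=
  if _h : cs.length ≤ 2 then
    match cs.getLast? with
    | none => cs
    | some c => pvPadA (cs ++ [c])
  else cs
termination_by 3 - cs.length
decreasing_by simp_all; omega

def solution (new_id : String) : String :=
  let answer := (PySem.Chars.lower new_id.toList).foldl
    (fun acc c => if pvAllowed c then acc ++ [c] else acc) []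
  let answer := pvLoopA answer 0 []
  let answer := pvRstripDot answer
  let answer := pvLstripDot answer
  let answer := if answer = [] then ['a', 'a', 'a'] else answer
  let answer := if answer.length > 15 then answer.take 15 else answer
  let answer := pvRstripDot answer
  String.ofList (pvPadA answer)

-- ===== PORT B =====
-- "c.isalpha() or c.isdigit() or c in '-_'" (B's non-dot test; '.' is handled first)
def pvAllowedB (c : Char) : Bool :=
  PySem.Chars.isalpha c || PySem.Chars.isdigit c || ['-', '_'].contains c

-- B's single for-loop with `break` at len 15: filter + collapse + lstrip + truncate at once
def pvScanB (out : List Char) : List Char → List Char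
  | [] => out
  | c :: cs =>
    if out.length == 15 then out
    else if c == '.' then
      (match out.getLast? with            -- `if out and out[-1] != '.'`
       | some d => if d == '.' then pvScanB out cs else pvScanB (out ++ ['.']) cs
       | none => pvScanB out cs)
    else if pvAllowedB c then pvScanB (out ++ [c]) cs
    else pvScanB out cs

-- B's `while out and out[-1] == '.': out.pop()`
def pvPopDots (out : List Char) : List Char :=
  match _h : out.getLast? with
  | some d => if d == '.' then pvPopDots out.dropLast else out
  | none => out
termination_by out.length
decreasing_by
  have hne : out ≠ [] := by intro h; subst h; simp at _h
  have := List.length_pos_iff.mpr hne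
  simp [List.length_dropLast]; omega

def solution_alt (new_id : String) : String :=
  let out := pvScanB [] (PySem.Chars.lower new_id.toList)
  let out := pvPopDots out
  let out := if out = [] then ['a', 'a', 'a'] else out
  String.ofList (out ++ List.replicate (3 - out.length) (PySem.List.pyGetD out (-1) 'a'))

-- ===== PRECONDITION & SPEC =====
def Spec_solution (new_id : String) (out : String) : Prop := out = solution_alt new_id
instance (new_id : String) (out : String) : Decidable (Spec_solution new_id out) := by unfold Spec_solution; infer_instance

-- ===== CLAIM (what is proved, stated in full; the proofs are below) =====
def Claim_equal_solution : Prop := ∀ (new_id : String), Dom_solution new_id → Spec_solution new_id (solution new_id)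

-- ===== LEMMAS AND PROOFS =====

-- re-statement of A's dot-collapse pass: every maximal run of '.' becomes one '.'
def pvCollapseDots : List Char → List Char
  | [] => []
  | c :: rest =>
      if c == '.' then '.' :: pvCollapseDots (rest.dropWhile (· == '.'))
      else c :: pvCollapseDots rest
termination_by cs => cs.length
decreasing_by all_goals simp [List.length_dropWhile_le]

-- A's index loop, restated structurally: keep c unless it is a '.' immediately followed by '.'
def pvG : List Char → List Char
  | [] => []
  | [c] => [c]
  | c :: d :: rest => if c == '.' && d == '.' then pvG (d :: rest) else c :: pvG (d :: rest)

theorem pvG_eq_collapse (cs : List Char) : pvG cs = pvCollapseDots cs := by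
  induction cs using pvG.induct with
  | case1 => simp [pvG, pvCollapseDots]
  | case2 c => simp [pvG, pvCollapseDots]
  | case3 c d rest hcd ih =>
      obtain ⟨hc, hd⟩ : c = '.' ∧ d = '.' := by simpa using hcd
      subst hc hd
      rw [pvG, if_pos hcd, ih]
      conv_rhs => rw [pvCollapseDots]
      simp [List.dropWhile]
      rw [pvCollapseDots]
      simp
  | case4 c d rest hcd ih =>
      rw [pvG, if_neg hcd, ih]
      by_cases hc : c = '.'
      · subst hc
        have hd : d ≠ '.' := by simpa using hcd
        conv_rhs => rw [pvCollapseDots]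
        rw [List.dropWhile_cons_of_neg (by simp [hd])]
        simp
      · conv_rhs => rw [pvCollapseDots]
        simp [hc]

theorem pvLoopA_eq_pvG (arr : List Char) : ∀ i acc, pvLoopA arr i acc = acc ++ pvG (arr.drop i) := by
  suffices h : ∀ n i acc, arr.length - i ≤ n → pvLoopA arr i acc = acc ++ pvG (arr.drop i) from
    fun i acc => h (arr.length - i) i acc le_rfl
  intro n
  induction n with
  | zero =>
      intro i acc h
      have hi : ¬ i < arr.length := by omega
      rw [pvLoopA, dif_neg hi, List.drop_eq_nil_of_le (by omega), pvG, List.append_nil]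
  | succ n ih =>
      intro i acc h
      by_cases hi : i < arr.length
      · rw [pvLoopA, dif_pos hi]
        by_cases hlast : (i == arr.length - 1 || arr.length == 1) = true
        · have hil : i = arr.length - 1 := by
            rcases (by simpa using hlast : i = arr.length - 1 ∨ arr.length = 1) with h1 | h1 <;> omega
          have hdrop : arr.drop i = [arr[i]] := by
            rw [List.drop_eq_getElem_cons hi, List.drop_eq_nil_of_le (by omega)]
          rw [if_pos hlast, hdrop, pvG]
        · have hne : ¬ (i = arr.length - 1 ∨ arr.length = 1) := by simpa using hlast
          have hi1 : i + 1 < arr.length := by omega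
          have hdrop : arr.drop i = arr[i] :: arr[i + 1] :: arr.drop (i + 2) := by
            rw [List.drop_eq_getElem_cons hi, List.drop_eq_getElem_cons hi1]
          have hgetD : arr.getD (i + 1) ' ' = arr[i + 1] := List.getD_eq_getElem arr ' ' hi1
          rw [if_neg hlast, hgetD, hdrop, pvG]
          by_cases hdot : (arr[i] == '.') = true
          · by_cases hdot2 : (arr[i + 1] == '.') = true
            · rw [if_pos hdot, if_pos hdot2, if_pos (by simp [hdot, hdot2]),
                  ih (i + 1) acc (by omega), List.drop_eq_getElem_cons hi1]
            · rw [if_pos hdot, if_neg hdot2, if_neg (by simp [hdot2]),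
                  ih (i + 1) (acc ++ [arr[i]]) (by omega), List.drop_eq_getElem_cons hi1,
                  List.append_assoc]
              rfl
          · rw [if_neg hdot, if_neg (by simp [hdot]),
                ih (i + 1) (acc ++ [arr[i]]) (by omega), List.drop_eq_getElem_cons hi1,
                List.append_assoc]
            rfl
      · rw [pvLoopA, dif_neg hi, List.drop_eq_nil_of_le (by omega), pvG, List.append_nil]

-- ---- rstrip / lstrip toolbox ----

theorem pvLstripDot_cons_dot (cs : List Char) : pvLstripDot ('.' :: cs) = pvLstripDot cs := by
  unfold pvLstripDot
  rw [List.dropWhile_cons_of_pos (by simp)]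

theorem pvLstripDot_cons_ne (c : Char) (cs : List Char) (hc : c ≠ '.') :
    pvLstripDot (c :: cs) = c :: cs := by
  unfold pvLstripDot
  rw [List.dropWhile_cons_of_neg (by simp [hc])]

theorem pvRstripDot_cons_ne (c : Char) (cs : List Char) (hc : c ≠ '.') :
    pvRstripDot (c :: cs) = c :: pvRstripDot cs := by
  unfold pvRstripDot
  rw [List.reverse_cons, List.dropWhile_append]
  split
  · next h =>
      rw [List.isEmpty_iff] at h
      rw [h, List.dropWhile_cons_of_neg (by simp [hc])]
      simp
  · simp

theorem pvRstripDot_append_dot (cs : List Char) :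
    pvRstripDot (cs ++ ['.']) = pvRstripDot cs := by
  unfold pvRstripDot
  simp

theorem pvRstripDot_cons_dot (cs : List Char) :
    pvRstripDot ('.' :: cs) = if pvRstripDot cs = [] then [] else '.' :: pvRstripDot cs := by
  unfold pvRstripDot
  rw [List.reverse_cons, List.dropWhile_append]
  split
  · next h =>
      rw [List.isEmpty_iff] at h
      rw [h]
      simp [List.dropWhile]
  · next h =>
      simp only [List.isEmpty_iff] at h
      rw [if_neg (by simp [h])]
      simp

theorem pvRstripDot_nil_lstrip (cs : List Char) (h : pvRstripDot cs = []) :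
    pvLstripDot cs = [] := by
  unfold pvRstripDot at h
  unfold pvLstripDot
  rw [List.reverse_eq_nil_iff, List.dropWhile_eq_nil_iff] at h
  rw [List.dropWhile_eq_nil_iff]
  intro x hx
  exact h x (List.mem_reverse.mpr hx)

-- lstrip and rstrip commute
theorem pvStrip_comm (cs : List Char) :
    pvLstripDot (pvRstripDot cs) = pvRstripDot (pvLstripDot cs) := by
  induction cs with
  | nil => rfl
  | cons c cs ih =>
      by_cases hc : c = '.'
      · subst hc
        rw [pvRstripDot_cons_dot, pvLstripDot_cons_dot]
        split
        · next h =>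
            rw [pvRstripDot_nil_lstrip cs h]
            rfl
        · rw [pvLstripDot_cons_dot, ih]
      · rw [pvRstripDot_cons_ne c cs hc, pvLstripDot_cons_ne c (pvRstripDot cs) hc,
            pvLstripDot_cons_ne c cs hc, pvRstripDot_cons_ne c cs hc]

-- ---- the streaming pass ≡ filter + collapse + lstrip + take 15 ----

-- emission automaton of B's loop, on the already-filtered character stream
def pvEmit : Option Char → List Char → List Char
  | _, [] => []
  | last, c :: xs =>
      if c = '.' then
        match last with
        | some d => if d = '.' then pvEmit last xs else '.' :: pvEmit (some '.') xs
        | none => pvEmit none xs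
      else c :: pvEmit (some c) xs

theorem pvAllowedB_eq (c : Char) (hc : c ≠ '.') : pvAllowedB c = pvAllowed c := by
  simp [pvAllowedB, pvAllowed, hc]

theorem pvScanB_eq_emit (xs : List Char) : ∀ out : List Char, out.length ≤ 15 →
    pvScanB out xs = (out ++ pvEmit out.getLast? (xs.filter pvAllowed)).take 15 := by
  induction xs with
  | nil => intro out h; simp [pvScanB, pvEmit, List.take_of_length_le h]
  | cons c xs ih =>
      intro out h
      by_cases h15 : out.length = 15
      · rw [pvScanB, if_pos (by simp [h15]), List.take_append,
            List.take_of_length_le (by omega), h15]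
        simp
      · by_cases hdot : c = '.'
        · subst hdot
          have hfil : List.filter pvAllowed ('.' :: xs) = '.' :: List.filter pvAllowed xs := by
            simp [pvAllowed]
          cases hl : out.getLast? with
          | none =>
              rw [pvScanB, if_neg (by simp [h15]), hl, hfil, ih out h, hl]
              simp [pvEmit]
          | some d =>
              by_cases hd : d = '.'
              · subst hd
                rw [pvScanB, if_neg (by simp [h15]), hl, hfil, ih out h, hl]
                simp [pvEmit]
              · rw [pvScanB, if_neg (by simp [h15]), hl, hfil,
                    ih (out ++ ['.']) (by simp; omega)]
                simp [pvEmit, hd, List.append_assoc]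
        · by_cases hall : pvAllowed c = true
          · rw [pvScanB, if_neg (by simp [h15]), if_neg (by simp [hdot]),
                if_pos (by rw [pvAllowedB_eq c hdot]; exact hall),
                List.filter_cons_of_pos hall, ih (out ++ [c]) (by simp; omega)]
            simp [pvEmit, hdot, List.append_assoc]
          · rw [pvScanB, if_neg (by simp [h15]), if_neg (by simp [hdot]),
                if_neg (by rw [pvAllowedB_eq c hdot]; simpa using hall),
                List.filter_cons_of_neg (by simpa using hall)]
            exact ih out h

theorem pvEmit_none_eq_dot (xs : List Char) : pvEmit none xs = pvEmit (some '.') xs := by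
  induction xs with
  | nil => rfl
  | cons c xs ih =>
      by_cases hc : c = '.'
      · subst hc
        simp [pvEmit, ih]
      · simp only [pvEmit, if_neg hc]

theorem pvEmit_eq_collapse (xs : List Char) :
    (∀ c, c ≠ '.' → pvEmit (some c) xs = pvCollapseDots xs) ∧
    pvEmit (some '.') xs = pvCollapseDots (xs.dropWhile (· == '.')) := by
  induction xs with
  | nil =>
      refine ⟨fun _ _ => ?_, ?_⟩ <;> simp [pvEmit, pvCollapseDots]
  | cons c xs ih =>
      constructor
      · intro d hd
        by_cases hc : c = '.'
        · subst hc
          rw [pvCollapseDots]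
          simp [pvEmit, hd, ih.2]
        · simp only [pvEmit, if_neg hc]
          rw [ih.1 c hc, pvCollapseDots]
          simp [hc]
      · by_cases hc : c = '.'
        · subst hc
          rw [List.dropWhile_cons_of_pos (by simp)]
          simp [pvEmit, ih.2]
        · simp only [pvEmit, if_neg hc]
          rw [ih.1 c hc, List.dropWhile_cons_of_neg (by simp [hc]), pvCollapseDots]
          simp [hc]

theorem pvLstrip_collapse (xs : List Char) :
    pvLstripDot (pvCollapseDots xs) = pvCollapseDots (xs.dropWhile (· == '.')) := by
  cases xs with
  | nil => simp [pvCollapseDots, pvLstripDot]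
  | cons c xs =>
      by_cases hc : c = '.'
      · subst hc
        rw [pvCollapseDots]
        simp only [if_pos (by simp : ((('.' : Char) == '.') = true))]
        rw [pvLstripDot_cons_dot, List.dropWhile_cons_of_pos (by simp)]
        cases hys : xs.dropWhile (· == '.') with
        | nil => simp [pvCollapseDots, pvLstripDot]
        | cons y ys =>
            have hy : ¬ (y == '.') = true := by
              have := List.head_dropWhile_not (p := (· == '.')) (l := xs) (by simp [hys])
              simpa [hys] using this
            rw [pvCollapseDots]
            simp only [if_neg hy]
            rw [pvLstripDot_cons_ne y _ (by simpa using hy)]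
      · rw [pvCollapseDots]
        simp only [if_neg (by simpa using hc : ¬ (c == '.') = true)]
        rw [List.dropWhile_cons_of_neg (by simpa using hc),
            pvLstripDot_cons_ne c _ hc, pvCollapseDots]
        simp [hc]

-- rstrip is blind to a trailing non-dot character
theorem pvRstripDot_append_ne (cs : List Char) (d : Char) (hd : d ≠ '.') :
    pvRstripDot (cs ++ [d]) = cs ++ [d] := by
  unfold pvRstripDot
  rw [List.reverse_append, List.reverse_singleton, List.singleton_append,
      List.dropWhile_cons_of_neg (by simp [hd])]
  simp

-- pop-loop = rstrip('.')
theorem pvPopDots_eq_rstrip (cs : List Char) : pvPopDots cs = pvRstripDot cs := by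
  induction hn : cs.length using Nat.strong_induction_on generalizing cs with
  | _ n ih =>
      unfold pvPopDots
      split
      · next d hl =>
          have hne : cs ≠ [] := by intro h; subst h; simp at hl
          have hcs : cs.dropLast ++ [d] = cs := by
            have h1 := List.dropLast_append_getLast hne
            rwa [(List.getLast_eq_iff_getLast?_eq_some hne).mpr hl] at h1
          by_cases hd : (d == '.') = true
          · rw [if_pos hd]
            have hd' : d = '.' := by simpa using hd
            subst hd'
            rw [ih cs.dropLast.length (by
                  subst hn
                  have := List.length_pos_iff.mpr hne
                  simp [List.length_dropLast]; omega) cs.dropLast rfl]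
            conv_rhs => rw [← hcs]
            rw [pvRstripDot_append_dot]
          · rw [if_neg hd]
            conv_rhs => rw [← hcs]
            rw [pvRstripDot_append_ne _ _ (by simpa using hd)]
            exact hcs.symm
      · next hl =>
          rw [List.getLast?_eq_none_iff.mp hl]
          rfl

-- the head of the collapse is the head of the input
theorem pvCollapse_head (xs : List Char) : (pvCollapseDots xs).head? = xs.head? := by
  cases xs with
  | nil => simp [pvCollapseDots]
  | cons c xs =>
      rw [pvCollapseDots]
      split <;> simp_all

-- a nonempty list whose head is not '.' keeps it through rstrip
theorem pvRstripDot_ne_nil (c : Char) (cs : List Char) (hc : c ≠ '.') :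
    pvRstripDot (c :: cs) ≠ [] := by
  rw [pvRstripDot_cons_ne c cs hc]; simp

-- a collapsed list is its rstrip, possibly plus ONE trailing '.' (dot runs have length 1)
theorem pvCollapse_decomp (xs : List Char) :
    pvCollapseDots xs = pvRstripDot (pvCollapseDots xs) ∨
    pvCollapseDots xs = pvRstripDot (pvCollapseDots xs) ++ ['.'] := by
  induction xs using pvCollapseDots.induct with
  | case1 => left; simp [pvCollapseDots, pvRstripDot]
  | case2 c rest hc ih =>
      have hc' : c = '.' := by simpa using hc
      subst hc'
      rw [pvCollapseDots, if_pos (by simp)]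
      cases hC : pvCollapseDots (rest.dropWhile (· == '.')) with
      | nil =>
          right
          rw [pvRstripDot_cons_dot]
          simp [pvRstripDot]
      | cons e t =>
          have he : e ≠ '.' := by
            have h1 := pvCollapse_head (rest.dropWhile (· == '.'))
            rw [hC] at h1
            cases hys : rest.dropWhile (· == '.') with
            | nil => rw [hys] at h1; simp at h1
            | cons y ys =>
                have hy := List.head_dropWhile_not (p := (· == '.')) (l := rest) (by simp [hys])
                have hyy : y ≠ '.' := by simpa [hys] using hy
                rw [hys] at h1
                simp at h1
                rw [h1]
                exact hyy
          rw [pvRstripDot_cons_dot, if_neg (pvRstripDot_ne_nil e t he)]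
          rw [hC] at ih
          rcases ih with h | h
          · left; rw [← h]
          · right; rw [List.cons_append, ← h]
  | case3 c rest hc ih =>
      have hc' : c ≠ '.' := by simpa using hc
      rw [pvCollapseDots, if_neg hc, pvRstripDot_cons_ne c _ hc']
      rcases ih with h | h
      · left; rw [← h]
      · right; rw [List.cons_append, ← h]

-- rstrip after take 15 is blind to the one possible trailing dot
theorem pvTake_rstrip (y : List Char)
    (hdec : y = pvRstripDot y ∨ y = pvRstripDot y ++ ['.']) :
    pvRstripDot (y.take 15) = pvRstripDot ((pvRstripDot y).take 15) := by
  rcases hdec with h | h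
  · rw [← h]
  · by_cases hlen : 15 ≤ (pvRstripDot y).length
    · conv_lhs => rw [h]
      rw [List.take_append, show 15 - (pvRstripDot y).length = 0 from by omega]
      simp
    · conv_lhs => rw [h]
      rw [List.take_of_length_le (by simp; omega), pvRstripDot_append_dot,
          List.take_of_length_le (by omega)]

-- A's while-loop in closed form, on the nonempty strings that reach it
theorem pvPadA_closed (cs : List Char) (h : cs ≠ []) :
    pvPadA cs = cs ++ List.replicate (3 - cs.length) (PySem.List.pyGetD cs (-1) 'a') := by
  match cs with
  | [a] =>
      simp [pvPadA, List.replicate, show PySem.List.pyGetD [a] (-1) 'a' = a from rfl]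
  | [a, b] =>
      simp [pvPadA, show PySem.List.pyGetD [a, b] (-1) 'a' = b from rfl]
  | a :: b :: c :: t =>
      rw [pvPadA, dif_neg (by simp only [List.length_cons]; omega),
          show (3 : Nat) - (a :: b :: c :: t).length = 0 from by
            simp only [List.length_cons]; omega]
      simp

-- ===== VERDICT (by name: the statement is the Claim_ definition above) =====
theorem solution_spec : Claim_equal_solution := by
  intro new_id _
  unfold Spec_solution solution solution_alt
  simp only [PySem.List.foldl_append_if_eq_filter, pvLoopA_eq_pvG, pvG_eq_collapse,
    List.drop_zero, List.nil_append]
  rw [pvScanB_eq_emit _ [] (by simp)]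
  simp only [List.getLast?_nil, List.nil_append]
  rw [pvEmit_none_eq_dot, (pvEmit_eq_collapse _).2, pvPopDots_eq_rstrip, pvStrip_comm,
      pvLstrip_collapse]
  set fcs := (PySem.Chars.lower new_id.toList).filter pvAllowed with hfcs
  set y := pvCollapseDots (fcs.dropWhile (· == '.')) with hy
  set z := pvRstripDot y with hz
  have hdec : y = z ∨ y = z ++ ['.'] := pvCollapse_decomp _
  cases hY : y with
  | nil =>
      have hznil : z = [] := by rw [hz, hY]; rfl
      rw [hznil, if_pos rfl,
          show pvRstripDot (List.take 15 ([] : List Char)) = [] from rfl, if_pos rfl,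
          show (if (['a', 'a', 'a'] : List Char).length > 15 then
                  List.take 15 ['a', 'a', 'a'] else ['a', 'a', 'a']) = ['a', 'a', 'a'] from by
            norm_num,
          show pvRstripDot ['a', 'a', 'a'] = ['a', 'a', 'a'] from rfl,
          pvPadA_closed _ (by simp)]
  | cons c t =>
      have hc : c ≠ '.' := by
        have h1 := pvCollapse_head (fcs.dropWhile (· == '.'))
        rw [← hy, hY] at h1
        cases hys : fcs.dropWhile (· == '.') with
        | nil => rw [hys] at h1; simp at h1
        | cons u us =>
            have hu := List.head_dropWhile_not (p := (· == '.')) (l := fcs) (by simp [hys])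
            have hu' : u ≠ '.' := by simpa [hys] using hu
            rw [hys] at h1
            simp at h1
            rw [h1]
            exact hu'
      have hzcons : z = c :: pvRstripDot t := by rw [hz, hY, pvRstripDot_cons_ne c t hc]
      have hzne : z ≠ [] := by rw [hzcons]; simp
      rw [if_neg hzne]
      have h15 : (if z.length > 15 then z.take 15 else z) = z.take 15 := by
        split
        · rfl
        · rw [List.take_of_length_le (by omega)]
      rw [h15, ← hY, pvTake_rstrip y hdec, ← hz]
      have hout : pvRstripDot (z.take 15) ≠ [] := by
        rw [hzcons, List.take_succ_cons]
        exact pvRstripDot_ne_nil c _ hc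
      rw [if_neg hout, pvPadA_closed _ hout]
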